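-- pv_equiv track=rewrite | github.com/vickymzheng/PracticeInterviewQuestions | stocks/stocks.py | buy_day
-- ===== SOURCE A (Python) =====
-- def buy_day(profits):
--     n = len(profits)
--     maxProf = 0
--     maxProfIndex = n-1
--     for i in range(n-1, -1, -1):
--         if profits[i] >= maxProf:
--             maxProfIndex = i
--             maxProf = profits[i]
--
--     if (maxProf <= 0):
--         return -1
--     return maxProfIndex
-- ===== SOURCE B (Python) =====
-- def buy_day(profits):
--     if not profits:
--         return -1
--     m = max(profits)
--     if m <= 0:
--         return -1
--     return profits.index(m)
-- ===== Notes on version B (the rewrite author's own statement) =====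
-- stated objective: idiomatic
-- what changed: A's single fused right-to-left scan with a running (maxProf, maxProfIndex) state is replaced by the idiomatic two-pass form: guard the empty list, take m = max(profits), return -1 if m <= 0, else profits.index(m) for the earliest occurrence.
import Mathlib
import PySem

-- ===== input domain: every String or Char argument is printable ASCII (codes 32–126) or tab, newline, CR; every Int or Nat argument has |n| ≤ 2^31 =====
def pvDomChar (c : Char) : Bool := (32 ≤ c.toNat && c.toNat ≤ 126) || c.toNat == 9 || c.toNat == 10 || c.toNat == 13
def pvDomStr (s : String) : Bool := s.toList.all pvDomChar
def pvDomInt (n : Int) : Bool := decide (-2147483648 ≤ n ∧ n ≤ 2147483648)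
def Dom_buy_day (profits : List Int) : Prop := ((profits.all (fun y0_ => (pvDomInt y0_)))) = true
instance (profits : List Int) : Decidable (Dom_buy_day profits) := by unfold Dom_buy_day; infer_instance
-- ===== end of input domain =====

-- B replaces A's fused backward scan by the idiomatic two-pass max/index form (same O(n) cost).

-- ===== PORT A =====
-- literal transliteration of A: backward index loop with running (maxProf, maxProfIndex)
def buy_day (profits : List Int) : Int :=
  let n : Int := (profits.length : Int)
  let st : Int × Int :=
    (PySem.List.pyRange (n - 1) (-1) (-1)).foldl
      (fun (s : Int × Int) (i : Int) =>
        if PySem.List.pyGetD profits i 0 ≥ s.1 then (PySem.List.pyGetD profits i 0, i) else s)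
      (0, n - 1)
  if st.1 ≤ 0 then -1 else st.2

-- ===== PORT B =====
-- literal transliteration of Source B: empty guard, m = max(profits), -1 if m ≤ 0, else profits.index(m)
def buy_day_alt (profits : List Int) : Int :=
  if profits = [] then -1
  else
    let m : Int := (PySem.List.max? profits (fun y => y)).getD 0
    if m ≤ 0 then -1
    else ((PySem.List.index? profits m).getD 0 : Int)

-- ===== PRECONDITION & SPEC =====
def Spec_buy_day (profits : List Int) (out : Int) : Prop := out = buy_day_alt profits
instance (profits : List Int) (out : Int) : Decidable (Spec_buy_day profits out) := by unfold Spec_buy_day; infer_instance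

-- ===== CLAIM (what is proved, stated in full; the proofs are below) =====
def Claim_equal_buy_day : Prop := ∀ (profits : List Int), Dom_buy_day profits → Spec_buy_day profits (buy_day profits)

-- ===== LEMMAS AND PROOFS =====

-- abstract model of A's backward loop: process the list front-last
def gState : List Int → Int × Int
  | [] => (0, -1)
  | x :: t =>
    let s := gState t
    if x ≥ s.1 then (x, 0) else (s.1, s.2 + 1)

theorem foldl_max_swap (l : List Int) (a b : Int) :
    l.foldl max (max a b) = max a (l.foldl max b) := by
  induction l generalizing b with
  | nil => rfl
  | cons y l ih =>
      simp only [List.foldl_cons, max_assoc, ih]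

theorem gState_fst_cons (x : Int) (t : List Int) :
    (gState (x :: t)).1 = max x (gState t).1 := by
  simp only [gState]
  by_cases h : x ≥ (gState t).1
  · rw [if_pos h]
    exact (max_eq_left h).symm
  · rw [if_neg h]
    exact (max_eq_right (by omega)).symm

theorem gState_fst (x : Int) (t : List Int) :
    (gState (x :: t)).1 = max 0 (t.foldl max x) := by
  induction t generalizing x with
  | nil =>
      rw [gState_fst_cons]
      simp [gState, max_comm]
  | cons y t' ih =>
      rw [gState_fst_cons, ih, List.foldl_cons, foldl_max_swap, max_left_comm]

theorem gState_snd (xs : List Int) (h : 0 < (gState xs).1) :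
    PySem.List.index? xs (gState xs).1 = some (gState xs).2.toNat ∧ 0 ≤ (gState xs).2 := by
  induction xs with
  | nil => simp [gState] at h
  | cons x t ih =>
      simp only [gState] at h ⊢
      by_cases hx : x ≥ (gState t).1
      · simp only [hx, if_pos] at h ⊢
        simpa using PySem.List.index?_cons_self x t
      · simp only [hx, if_neg, not_false_iff] at h ⊢
        obtain ⟨h1, h2⟩ := ih h
        refine ⟨?_, by omega⟩
        rw [PySem.List.index?_cons_of_ne t (show x ≠ (gState t).1 by
              intro he; exact hx (le_of_eq he.symm)), h1]
        simp only [Option.map_some, Option.some.injEq]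
        omega

-- A's backward loop over indices c..c+|t|-1 of pre++t (|pre| = c) computes gState t with indices shifted by c
theorem shift_lemma (t : List Int) (pre : List Int) :
    List.foldr
      (fun (i : Int) (s : Int × Int) =>
        if PySem.List.pyGetD (pre ++ t) i 0 ≥ s.1 then (PySem.List.pyGetD (pre ++ t) i 0, i) else s)
      (0, ((pre.length : Int) + (t.length : Int)) - 1)
      (PySem.List.pyRange (pre.length : Int) ((pre.length : Int) + (t.length : Int)) 1)
    = ((gState t).1, (gState t).2 + (pre.length : Int)) := by
  induction t generalizing pre with
  | nil =>
      rw [PySem.List.pyRange_one_eq_nil (by simp)]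
      simp only [List.foldr_nil, gState]
      refine Prod.ext rfl ?_
      simp
      omega
  | cons y t' ih =>
      rw [PySem.List.pyRange_one_cons (by simp only [List.length_cons]; push_cast; omega)]
      rw [List.foldr_cons]
      have hlen : ((pre.length : Int) + ((y :: t').length : Int)) = (((pre ++ [y]).length : Int) + (t'.length : Int)) := by
        simp only [List.length_cons, List.length_append, List.length_nil]
        push_cast; omega
      have hc1 : ((pre.length : Int) + 1) = ((pre ++ [y]).length : Int) := by
        simp only [List.length_append, List.length_cons, List.length_nil]; push_cast; omega
      have happ : pre ++ y :: t' = (pre ++ [y]) ++ t' := by simp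
      rw [hc1, hlen, happ, ih (pre ++ [y])]
      have hget : PySem.List.pyGetD ((pre ++ [y]) ++ t') (pre.length : Int) 0 = y := by
        rw [PySem.List.pyGetD_eq_getElem _ _ (by positivity) (by
              simp only [List.length_append, List.length_cons, List.length_nil]; push_cast; omega)]
        simp only [Int.toNat_natCast]
        rw [List.getElem_of_eq (List.append_assoc pre [y] t'),
            List.getElem_append_right (le_refl pre.length)]
        simp
      rw [hget]
      simp only [gState]
      by_cases hy : y ≥ (gState t').1
      · rw [if_pos hy, if_pos hy]
        simp
      · rw [if_neg hy, if_neg hy]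
        refine Prod.ext rfl ?_
        simp only [List.length_append, List.length_cons, List.length_nil]
        push_cast; omega

-- A's result expressed through gState
theorem buy_day_eq_gState (profits : List Int) :
    buy_day profits = (if (gState profits).1 ≤ 0 then -1 else (gState profits).2) := by
  simp only [buy_day]
  have hrev : PySem.List.pyRange ((profits.length : Int) - 1) (-1) (-1)
      = (PySem.List.pyRange 0 (profits.length : Int) 1).reverse := by
    rw [PySem.List.pyRange_neg_one_eq_reverse]
    norm_num
  rw [hrev, List.foldl_reverse]
  have h := shift_lemma profits []
  simp only [List.length_nil, Nat.cast_zero, zero_add, List.nil_append] at h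
  rw [h]
  simp

-- B's result on a nonempty list
theorem buy_day_alt_cons (x : Int) (t : List Int) :
    buy_day_alt (x :: t) =
      (if t.foldl max x ≤ 0 then -1 else ((PySem.List.index? (x :: t) (t.foldl max x)).getD 0 : Int)) := by
  simp [buy_day_alt, PySem.List.max?_id_cons]

-- ===== VERDICT (by name: the statement is the Claim_ definition above) =====
theorem buy_day_spec : Claim_equal_buy_day := by
  intro profits _
  unfold Spec_buy_day
  rw [buy_day_eq_gState]
  cases profits with
  | nil => simp [gState, buy_day_alt]
  | cons x t =>
      rw [buy_day_alt_cons]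
      have hfst := gState_fst x t
      by_cases hM : t.foldl max x ≤ 0
      · rw [if_pos (by rw [hfst]; exact max_le (le_refl 0) hM), if_pos hM]
      · have hMpos : 0 < t.foldl max x := by omega
        have heq : (gState (x :: t)).1 = t.foldl max x := by
          rw [hfst]; exact max_eq_right (le_of_lt hMpos)
        have hpos : 0 < (gState (x :: t)).1 := by omega
        obtain ⟨h1, h2⟩ := gState_snd (x :: t) hpos
        rw [if_neg (by omega), if_neg hM, ← heq, h1]
        simp only [Option.getD_some]
        omega
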